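-- pv_equiv track=rewrite | github.com/ben-z/measurement-corruption-detection-sim | bsim_v3/lib/detectors/utils.py | calc_invalid_spans
-- ===== SOURCE A (Python) =====
-- def calc_invalid_spans(validities, idx):
--     """
--     Given a list of validities, returns the spans of invalid values.
--     Parameters:
--         validities: list[bool] - list of validities
--         idx: int - the index to check
--     Returns:
--         spans: list[tuple[int, int]] - list of tuples of start and end indices of invalid spans
--     """
--     ret = []
--
--     start = None
--     for i, v in enumerate(validities):
--         if v[idx] == False:
--             if start is None:
--                 start = i
--         else:
--             if start is not None:
--                 ret.append((start, i))
--                 start = None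
--     if start is not None:
--         ret.append((start, len(validities)))
--
--     return ret
-- ===== SOURCE B (Python) =====
-- def calc_invalid_spans(validities, idx):
--     invalid = [i for i, v in enumerate(validities) if v[idx] == False]
--     if not invalid:
--         return []
--     spans = []
--     s = e = invalid[0]
--     for i in invalid[1:]:
--         if i == e + 1:
--             e = i
--         else:
--             spans.append((s, e + 1))
--             s = e = i
--     spans.append((s, e + 1))
--     return spans
-- ===== Notes on version B (the rewrite author's own statement) =====
-- stated objective: simpler
-- what changed: Replaces A's stateful start/None scan with a filtered comprehension of invalid indices followed by grouping consecutive indices into runs.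
import Mathlib
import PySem

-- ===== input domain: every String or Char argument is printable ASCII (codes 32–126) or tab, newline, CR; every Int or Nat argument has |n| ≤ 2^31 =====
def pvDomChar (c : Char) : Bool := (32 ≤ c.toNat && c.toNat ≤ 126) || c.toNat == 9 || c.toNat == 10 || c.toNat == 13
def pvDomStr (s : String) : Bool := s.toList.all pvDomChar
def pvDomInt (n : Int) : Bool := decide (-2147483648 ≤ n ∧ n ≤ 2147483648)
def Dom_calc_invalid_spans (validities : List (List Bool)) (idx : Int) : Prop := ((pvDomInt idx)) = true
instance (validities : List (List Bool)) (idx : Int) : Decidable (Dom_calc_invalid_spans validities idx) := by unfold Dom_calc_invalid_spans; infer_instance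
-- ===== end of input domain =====

-- B replaces A's stateful start/None scan by a filtered list of invalid indices
-- grouped into maximal consecutive runs (objective: simpler decomposition).
-- ===== PORT A =====
-- the for-loop of A: state = (running index n, start : Option, accumulated ret)
def pvLoopA : List (List Bool) → Int → Int → Option Int → List (Int × Int) → List (Int × Int)
  | [], _, n, start, ret =>
    match start with
    | none => ret
    | some s => ret ++ [(s, n)]
  | v :: rest, idx, n, start, ret =>
    if PySem.List.pyGet? v idx == some false then
      match start with
      | none => pvLoopA rest idx (n + 1) (some n) ret
      | some _ => pvLoopA rest idx (n + 1) start ret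
    else
      match start with
      | none => pvLoopA rest idx (n + 1) none ret
      | some s => pvLoopA rest idx (n + 1) none (ret ++ [(s, n)])

def calc_invalid_spans (validities : List (List Bool)) (idx : Int) : List (Int × Int) :=
  pvLoopA validities idx 0 none []

-- ===== PORT B =====
-- [i for i, v in enumerate(validities, start) if v[idx] == False]
def pvInvalid (validities : List (List Bool)) (idx : Int) (start : Int) : List Int :=
  ((PySem.List.enumerate validities start).filter
    (fun p => PySem.List.pyGet? p.2 idx == some false)).map (·.1)

-- the for-loop of B: current run (s, e), accumulated spans
def pvRuns : List Int → Int → Int → List (Int × Int) → List (Int × Int)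
  | [], s, e, spans => spans ++ [(s, e + 1)]
  | i :: rest, s, e, spans =>
    if i = e + 1 then pvRuns rest s i spans
    else pvRuns rest i i (spans ++ [(s, e + 1)])

def calc_invalid_spans_alt (validities : List (List Bool)) (idx : Int) : List (Int × Int) :=
  match pvInvalid validities idx 0 with
  | [] => []
  | x :: xs => pvRuns xs x x []

-- ===== PRECONDITION & SPEC =====
-- Pre_: idx is a valid (possibly negative) Python index into every row; outside this A raises IndexError.
def Pre_calc_invalid_spans (validities : List (List Bool)) (idx : Int) : Prop :=
  ∀ v ∈ validities, PySem.Raise.InRange v.length idx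
instance (validities : List (List Bool)) (idx : Int) : Decidable (Pre_calc_invalid_spans validities idx) := by unfold Pre_calc_invalid_spans; infer_instance
def pvWitness_calc_invalid_spans : List (List Bool) × Int := ([[false], [true], [false]], 0)
def Spec_calc_invalid_spans (validities : List (List Bool)) (idx : Int) (out : List (Int × Int)) : Prop := out = calc_invalid_spans_alt validities idx
instance (validities : List (List Bool)) (idx : Int) (out : List (Int × Int)) : Decidable (Spec_calc_invalid_spans validities idx out) := by unfold Spec_calc_invalid_spans; infer_instance

-- ===== CLAIM (what is proved, stated in full; the proofs are below) =====
def Claim_equal_calc_invalid_spans : Prop := ∀ (validities : List (List Bool)) (idx : Int), Dom_calc_invalid_spans validities idx → Pre_calc_invalid_spans validities idx → Spec_calc_invalid_spans validities idx (calc_invalid_spans validities idx)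

-- ===== LEMMAS AND PROOFS =====

theorem pvInvalid_cons (v : List Bool) (rest : List (List Bool)) (idx n : Int) :
    pvInvalid (v :: rest) idx n =
      if PySem.List.pyGet? v idx == some false
      then n :: pvInvalid rest idx (n + 1)
      else pvInvalid rest idx (n + 1) := by
  by_cases h : PySem.List.pyGet? v idx == some false
  · simp [pvInvalid, PySem.List.enumerate_cons, h]
  · simp [pvInvalid, PySem.List.enumerate_cons, h]

theorem pvInvalid_ge (l : List (List Bool)) (idx : Int) :
    ∀ n x, x ∈ pvInvalid l idx n → n ≤ x := by
  induction l with
  | nil => intro n x hx; simp [pvInvalid] at hx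
  | cons v rest ih =>
    intro n x hx
    rw [pvInvalid_cons] at hx
    split_ifs at hx with h
    · rcases List.mem_cons.mp hx with rfl | hx
      · exact le_refl x
      · have := ih (n + 1) x hx; omega
    · have := ih (n + 1) x hx; omega

theorem pvLoopA_eq (idx : Int) (l : List (List Bool)) :
    ∀ n ret,
      (pvLoopA l idx n none ret =
        (match pvInvalid l idx n with
          | [] => ret
          | x :: xs => pvRuns xs x x ret)) ∧
      (∀ s, pvLoopA l idx n (some s) ret = pvRuns (pvInvalid l idx n) s (n - 1) ret) := by
  induction l with
  | nil =>
    intro n ret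
    constructor
    · simp [pvLoopA, pvInvalid]
    · intro s
      simp [pvLoopA, pvInvalid, pvRuns]
  | cons v rest ih =>
    intro n ret
    by_cases h : PySem.List.pyGet? v idx == some false
    · constructor
      · rw [show pvLoopA (v :: rest) idx n none ret
              = pvLoopA rest idx (n + 1) (some n) ret by simp [pvLoopA, h]]
        rw [(ih (n + 1) ret).2 n, pvInvalid_cons]
        simp [h]
      · intro s
        rw [show pvLoopA (v :: rest) idx n (some s) ret
              = pvLoopA rest idx (n + 1) (some s) ret by simp [pvLoopA, h]]
        rw [(ih (n + 1) ret).2 s, pvInvalid_cons]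
        simp [h, pvRuns]
    · constructor
      · rw [show pvLoopA (v :: rest) idx n none ret
              = pvLoopA rest idx (n + 1) none ret by simp [pvLoopA, h]]
        rw [(ih (n + 1) ret).1, pvInvalid_cons]
        simp [h]
      · intro s
        rw [show pvLoopA (v :: rest) idx n (some s) ret
              = pvLoopA rest idx (n + 1) none (ret ++ [(s, n)]) by simp [pvLoopA, h]]
        rw [(ih (n + 1) (ret ++ [(s, n)])).1, pvInvalid_cons]
        simp only [h]
        cases hinv : pvInvalid rest idx (n + 1) with
        | nil => simp [pvRuns]
        | cons x xs =>
          have hx : n + 1 ≤ x := pvInvalid_ge rest idx (n + 1) x (by rw [hinv]; exact List.mem_cons_self)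
          simp only [Bool.false_eq_true, if_false]
          simp [pvRuns]
          intro he
          omega

-- ===== VERDICT (by name: the statement is the Claim_ definition above) =====
theorem calc_invalid_spans_spec : Claim_equal_calc_invalid_spans := by
  intro validities idx _ _
  unfold Spec_calc_invalid_spans calc_invalid_spans calc_invalid_spans_alt
  rw [(pvLoopA_eq idx validities 0 []).1]
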